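-- pv_equiv track=rewrite | github.com/HuyHoang2709/CodePTIT | BaiTapPython/PY01049_ChuSoNguyenTo.py | ktra
-- ===== SOURCE A (Python) =====
-- import math
--
-- def ngto(n):
--     if n <= 3:
--         return n > 1
--     else:
--         if n % 2 == 0 or n % 3 == 0:
--             return False
--         else:
--             sqr = math.sqrt(n)
--             i = 5
--             while i <= sqr:
--                 if n % i == 0 or n % (i + 2) == 0:
--                     return False
--                 i += 6
--     return True
--
-- def ktra(n):
--     length = len(n)
--     if not ngto(length):
--         return False
--     dem = 0
--     for i in n:
--         if i == '2' or i == '3' or i == '5' or i == '7':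
--             dem += 1
--     if dem * 2 <= length:
--         return False
--     return True
-- ===== SOURCE B (Python) =====
-- def ktra(n):
--     length = len(n)
--     if length < 2 or any(length % i == 0 for i in range(2, length)):
--         return False
--     return 2 * sum(c in '2357' for c in n) > length
-- ===== Notes on version B (the rewrite author's own statement) =====
-- stated objective: simpler
-- what changed: Replaced the wheel-factorized sqrt(n) primality helper plus explicit counting loop with a two-line check: naive trial division over all of range(2, length) and a sum-comprehension count of prime digits.
import Mathlib
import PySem

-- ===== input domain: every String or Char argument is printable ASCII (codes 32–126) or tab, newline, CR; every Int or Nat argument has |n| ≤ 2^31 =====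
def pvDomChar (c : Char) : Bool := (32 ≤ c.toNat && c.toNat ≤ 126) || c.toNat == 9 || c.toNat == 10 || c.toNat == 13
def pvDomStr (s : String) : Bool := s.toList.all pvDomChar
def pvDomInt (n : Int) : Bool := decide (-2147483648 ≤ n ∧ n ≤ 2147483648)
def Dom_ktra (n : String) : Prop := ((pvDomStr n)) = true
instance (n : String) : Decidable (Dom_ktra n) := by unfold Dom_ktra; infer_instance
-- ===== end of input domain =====

-- B replaces A's wheel-factorized √n primality helper by naive trial division over
-- range(2, length) and the counting loop by a sum comprehension (simpler, not faster).

-- ===== PORT A =====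
-- the while loop of ngto; `i <= math.sqrt(L)` is ported as `i * i ≤ L`,
-- exact for the integer values compared here
def loopA (L i : Nat) : Bool :=
  if i * i ≤ L then
    if L % i == 0 || L % (i + 2) == 0 then false
    else loopA L (i + 6)
  else true
termination_by L + 1 - i
decreasing_by
  rcases Nat.eq_zero_or_pos i with h0 | h0
  · omega
  · have : i ≤ i * i := Nat.le_mul_of_pos_left i h0
    omega

def ngtoA (L : Nat) : Bool :=
  if L ≤ 3 then decide (L > 1)
  else if L % 2 == 0 || L % 3 == 0 then false
  else loopA L 5

def ktra (n : String) : Bool :=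
  let length := n.toList.length
  if !ngtoA length then false
  else
    let dem := n.toList.foldl
      (fun dem i => if i == '2' || i == '3' || i == '5' || i == '7' then dem + 1 else dem) 0
    if dem * 2 ≤ length then false else true

-- ===== PORT B =====
-- range(2, length) over the nonnegative length is ported as List.range' 2 (length - 2)
def ktra_alt (n : String) : Bool :=
  let length := n.toList.length
  if decide (length < 2) || (List.range' 2 (length - 2)).any (fun i => length % i == 0) then
    false
  else
    decide (2 * (n.toList.foldl (fun a c => a + (if "2357".toList.contains c then 1 else 0)) 0) > length)

-- ===== PRECONDITION & SPEC =====
def Spec_ktra (n : String) (out : Bool) : Prop := out = ktra_alt n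
instance (n : String) (out : Bool) : Decidable (Spec_ktra n out) := by unfold Spec_ktra; infer_instance

-- ===== CLAIM (what is proved, stated in full; the proofs are below) =====
def Claim_equal_ktra : Prop := ∀ (n : String), Dom_ktra n → Spec_ktra n (ktra n)

-- ===== LEMMAS AND PROOFS =====

theorem dvd_mod_zero {m L : Nat} (h : m ∣ L) : L % m = 0 := by
  obtain ⟨k, rfl⟩ := h
  exact Nat.mul_mod_right m k

-- the two digit-counting folds agree
theorem count_eq (l : List Char) (a : Nat) :
    l.foldl (fun dem i => if i == '2' || i == '3' || i == '5' || i == '7' then dem + 1 else dem) a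
      = l.foldl (fun a c => a + (if "2357".toList.contains c then 1 else 0)) a := by
  induction l generalizing a with
  | nil => rfl
  | cons c l ih =>
    simp only [List.foldl_cons]
    rw [ih]
    have hc : ("2357".toList.contains c) = (c == '2' || c == '3' || c == '5' || c == '7') := by
      simp [show "2357".toList = ['2', '3', '5', '7'] from rfl,
        Bool.or_assoc, beq_eq_decide]
    rw [hc]
    congr 1
    split <;> omega

theorem loopA_prime (L i : Nat) (h4 : 3 < L) (h2 : L % 2 ≠ 0) (h3 : L % 3 ≠ 0) :
    5 ≤ i → i % 6 = 5 → (∀ m, 2 ≤ m → m < i → ¬ m ∣ L) →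
    loopA L i = decide (Nat.Prime L) := by
  fun_induction loopA L i with
  | case1 i hle hdiv =>
    intro hi5 hi6 hnd
    have h5i : 5 * i ≤ i * i := Nat.mul_le_mul_right i hi5
    simp only [Bool.or_eq_true, beq_iff_eq] at hdiv
    have hnp : ¬ Nat.Prime L := by
      intro hp
      rcases hdiv with hd | hd
      · rcases hp.eq_one_or_self_of_dvd i (Nat.dvd_of_mod_eq_zero hd) with h | h <;> omega
      · rcases hp.eq_one_or_self_of_dvd (i + 2) (Nat.dvd_of_mod_eq_zero hd) with h | h <;> omega
    rw [decide_eq_false hnp]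
  | case2 i hle hdiv ih =>
    intro hi5 hi6 hnd
    simp only [Bool.or_eq_true, beq_iff_eq, not_or] at hdiv
    apply ih (by omega) (by omega)
    intro m hm hlt hdvd
    rcases Nat.lt_or_ge m i with h | h
    · exact hnd m hm h hdvd
    · have hcase : m = i ∨ m = i + 1 ∨ m = i + 2 ∨ m = i + 3 ∨ m = i + 4 ∨ m = i + 5 := by omega
      rcases hcase with h | h | h | h | h | h
      · subst h
        exact hdiv.1 (dvd_mod_zero hdvd)
      · have h2m : (2 : Nat) ∣ m := by omega
        have : (2 : Nat) ∣ L := h2m.trans hdvd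
        omega
      · subst h
        exact hdiv.2 (dvd_mod_zero hdvd)
      · have h2m : (2 : Nat) ∣ m := by omega
        have : (2 : Nat) ∣ L := h2m.trans hdvd
        omega
      · have h3m : (3 : Nat) ∣ m := by omega
        have : (3 : Nat) ∣ L := h3m.trans hdvd
        omega
      · have h2m : (2 : Nat) ∣ m := by omega
        have : (2 : Nat) ∣ L := h2m.trans hdvd
        omega
  | case3 i hle =>
    intro hi5 hi6 hnd
    have hp : Nat.Prime L := by
      rw [Nat.prime_def_lt]
      refine ⟨by omega, fun m hlt hdvd => ?_⟩
      by_contra hne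
      have hm0 : m ≠ 0 := by
        rintro rfl
        have := Nat.eq_zero_of_zero_dvd hdvd
        omega
      have hm2 : 2 ≤ m := by omega
      have hmlt : m < i := by
        by_contra hge
        have hk : m * (L / m) = L := Nat.mul_div_cancel' hdvd
        have hkd : (L / m) ∣ L := Nat.div_dvd_of_dvd hdvd
        have hk2 : 2 ≤ L / m := by
          rcases Nat.lt_or_ge (L / m) 2 with hx | hx
          · interval_cases h : (L / m) <;> omega
          · exact hx
        have hki : L / m < i := by
          by_contra hge'
          have : i * i ≤ m * (L / m) := Nat.mul_le_mul (by omega) (by omega)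
          omega
        exact hnd (L / m) hk2 hki hkd
      exact hnd m hm2 hmlt hdvd
    rw [decide_eq_true hp]

theorem ngtoA_eq_prime (L : Nat) : ngtoA L = decide (Nat.Prime L) := by
  unfold ngtoA
  split
  · rename_i h
    interval_cases L <;> decide
  · rename_i h
    split
    · rename_i hd
      simp only [Bool.or_eq_true, beq_iff_eq] at hd
      have hnp : ¬ Nat.Prime L := by
        intro hp
        rcases hd with hd | hd
        · rcases hp.eq_one_or_self_of_dvd 2 (Nat.dvd_of_mod_eq_zero hd) with h' | h' <;> omega
        · rcases hp.eq_one_or_self_of_dvd 3 (Nat.dvd_of_mod_eq_zero hd) with h' | h' <;> omega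
      rw [decide_eq_false hnp]
    · rename_i hd
      simp only [Bool.or_eq_true, beq_iff_eq, not_or] at hd
      apply loopA_prime L 5 (by omega) hd.1 hd.2 (by omega) (by omega)
      intro m hm hlt hdvd
      interval_cases m <;> omega

-- ===== VERDICT (by name: the statement is the Claim_ definition above) =====
theorem ktra_spec : Claim_equal_ktra := by
  intro n _
  unfold Spec_ktra ktra ktra_alt
  simp only [ngtoA_eq_prime]
  set L := n.toList.length with hL
  by_cases hp : Nat.Prime L
  · have h2 : 2 ≤ L := hp.two_le
    rw [decide_eq_true hp]
    have hany : (List.range' 2 (L - 2)).any (fun i => L % i == 0) = false := by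
      simp only [List.any_eq_false, List.mem_range']
      rintro i ⟨hi1, hi2⟩
      simp only [beq_iff_eq]
      intro h0
      rcases hp.eq_one_or_self_of_dvd i (Nat.dvd_of_mod_eq_zero h0) with h | h <;> omega
    have hcond : (decide (L < 2) || (List.range' 2 (L - 2)).any (fun i => L % i == 0)) = false := by
      rw [hany, decide_eq_false (by omega : ¬ L < 2)]
      rfl
    simp only [Bool.not_true, Bool.false_eq_true, if_false, hcond]
    rw [count_eq]
    split <;> rename_i hc
    · symm; simp only [decide_eq_false_iff_not]; omega
    · symm; simp only [decide_eq_true_iff]; omega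
  · rw [decide_eq_false hp]
    simp only [Bool.not_false, if_true]
    symm
    have hcond : (decide (L < 2) || (List.range' 2 (L - 2)).any (fun i => L % i == 0)) = true := by
      rcases Nat.lt_or_ge L 2 with hlt | hge
      · rw [decide_eq_true hlt]; rfl
      · obtain ⟨m, hdvd, hm2, hmlt⟩ := Nat.exists_dvd_of_not_prime2 hge hp
        have hmem : m ∈ List.range' 2 (L - 2) := by
          rw [List.mem_range'_1]
          omega
        have : (List.range' 2 (L - 2)).any (fun i => L % i == 0) = true := by
          rw [List.any_eq_true]
          exact ⟨m, hmem, by simp [dvd_mod_zero hdvd]⟩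
        rw [this, Bool.or_true]
    simp only [hcond, if_true]
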